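-- pv_equiv track=rewrite | github.com/ooMia/BOJ | 프로그래머스/1/258712. 가장 많이 받은 선물/가장 많이 받은 선물.py | make_dict_map_gave_took_met
-- ===== SOURCE A (Python) =====
-- def make_dict_map_gave_took_met(
--     friends_dict,
--     matrix_from_to
-- ) -> dict:
--
--     sum_i_row = lambda mat, i: sum(mat[i])
--     sum_i_col = lambda mat, i: list(map(sum, zip(*mat)))[i]
--
--     res = dict()
--     for key in friends_dict.keys():
--         i = friends_dict[key]
--         gave = sum_i_row(matrix_from_to, i)
--         took = sum_i_col(matrix_from_to, i)
--         met = gave - took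
--         res[key] = [gave, took, met]
--
--     return res
-- ===== SOURCE B (Python) =====
-- def make_dict_map_gave_took_met(friends_dict, matrix_from_to):
--     row_sums = [sum(row) for row in matrix_from_to]
--     m = min(map(len, matrix_from_to)) if matrix_from_to else 0
--     col_sums = [sum(row[j] for row in matrix_from_to) for j in range(m)]
--     res = {}
--     for key, i in friends_dict.items():
--         gave = row_sums[i]
--         took = col_sums[i]
--         res[key] = [gave, took, gave - took]
--     return res
-- ===== Notes on version B (the rewrite author's own statement) =====
-- stated objective: faster
-- what changed: A rebuilds the full transpose and all column sums via zip(*mat) for every friend (and re-sums the row each time); B precomputes row sums and column sums once in O(n*m) and then does O(1) lookups per friend.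
import Mathlib
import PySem

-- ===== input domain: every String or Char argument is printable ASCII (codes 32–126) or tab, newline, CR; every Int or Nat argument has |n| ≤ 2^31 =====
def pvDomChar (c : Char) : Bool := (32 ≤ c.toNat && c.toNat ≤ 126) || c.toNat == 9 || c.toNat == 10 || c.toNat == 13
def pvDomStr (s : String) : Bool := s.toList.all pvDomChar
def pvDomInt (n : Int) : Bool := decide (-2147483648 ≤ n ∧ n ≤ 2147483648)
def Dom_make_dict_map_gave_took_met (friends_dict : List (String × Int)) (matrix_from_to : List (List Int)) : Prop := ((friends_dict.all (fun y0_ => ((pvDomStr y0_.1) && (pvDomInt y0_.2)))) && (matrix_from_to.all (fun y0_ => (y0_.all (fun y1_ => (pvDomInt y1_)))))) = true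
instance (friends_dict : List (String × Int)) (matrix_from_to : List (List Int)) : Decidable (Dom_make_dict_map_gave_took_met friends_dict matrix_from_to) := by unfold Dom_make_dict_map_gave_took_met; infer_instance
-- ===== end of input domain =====

-- B precomputes the row sums and the column sums once instead of rebuilding the whole
-- transpose (zip(*mat)) and all its column sums anew for every friend; same return value.

-- ===== PORT A =====
-- termination measure lemma for pyZipStar (cited by its decreasing_by)
lemma pv_tail_sum_lt (mat : List (List Int)) (hne : mat ≠ []) (hrows : ∀ r ∈ mat, r ≠ []) :
    ((mat.map List.tail).map List.length).sum < (mat.map List.length).sum := by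
  cases mat with
  | nil => exact absurd rfl hne
  | cons r rs =>
    simp only [List.map_cons, List.sum_cons]
    have h1 : r.tail.length < r.length := by
      have : r ≠ [] := hrows r (by simp)
      cases r with | nil => simp at this | cons a as => simp
    have h2 : ((rs.map List.tail).map List.length).sum ≤ (rs.map List.length).sum := by
      simp only [List.map_map]
      apply List.sum_le_sum
      intro x hx
      simp [List.length_tail]
    omega

-- zip(*mat): truncating transpose, exactly Python's zip over the row iterators.
def pyZipStar (mat : List (List Int)) : List (List Int) :=
  if mat.isEmpty || mat.any List.isEmpty then []
  else (mat.map (fun r => r.headD 0)) :: pyZipStar (mat.map List.tail)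
termination_by (mat.map List.length).sum
decreasing_by
  rename_i h
  simp only [Bool.or_eq_true, List.isEmpty_iff, List.any_eq_true, not_or, not_exists,
    not_and] at h
  simp only [List.map_attach_eq_pmap, List.pmap_eq_map]
  exact pv_tail_sum_lt mat h.1 h.2

-- sum_i_row / sum_i_col from A (the .getD defaults are only reached when Python raises
-- IndexError, i.e. outside Pre_).
def pvSumIRow (mat : List (List Int)) (i : Int) : Int :=
  ((PySem.List.pyGet? mat i).getD []).sum
def pvSumICol (mat : List (List Int)) (i : Int) : Int :=
  (PySem.List.pyGet? ((pyZipStar mat).map List.sum) i).getD 0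

def make_dict_map_gave_took_met (friends_dict : List (String × Int)) (matrix_from_to : List (List Int)) : List (String × List Int) :=
  ((PySem.List.dedup (friends_dict.map Prod.fst)).foldl
    (fun res key =>
      let i := ((PySem.Dict.mk friends_dict).get? key).getD 0
      let gave := pvSumIRow matrix_from_to i
      let took := pvSumICol matrix_from_to i
      res.insert key [gave, took, gave - took])
    (PySem.Dict.empty : PySem.Dict String (List Int))).items

-- ===== PORT B =====
-- min(map(len, matrix_from_to)) if matrix_from_to else 0
def pvMinLen (mat : List (List Int)) : Nat :=
  match mat with
  | [] => 0
  | r :: rs => rs.foldl (fun a row => min a row.length) r.length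

def make_dict_map_gave_took_met_alt (friends_dict : List (String × Int)) (matrix_from_to : List (List Int)) : List (String × List Int) :=
  let rowSums := matrix_from_to.map List.sum
  -- row[j] ported as getD: exact, since j < pvMinLen ≤ every row's length
  let colSums := (List.range (pvMinLen matrix_from_to)).map
      (fun j => (matrix_from_to.map (fun row => row.getD j 0)).sum)
  (friends_dict.foldl
    (fun res p =>
      let gave := (PySem.List.pyGet? rowSums p.2).getD 0
      let took := (PySem.List.pyGet? colSums p.2).getD 0
      res.insert p.1 [gave, took, gave - took])
    (PySem.Dict.empty : PySem.Dict String (List Int))).items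

-- ===== PRECONDITION & SPEC =====
-- Pre_ excludes (a) inputs where A raises IndexError (a friend's index outside the matrix's row
-- list or outside the zip-truncated column-sum list), and (b) association lists with duplicate
-- keys, which cannot arise from a Python dict (the dict convention has unique keys).
def Pre_make_dict_map_gave_took_met (friends_dict : List (String × Int)) (matrix_from_to : List (List Int)) : Prop :=
  (friends_dict.map Prod.fst).Nodup ∧
  ∀ p ∈ friends_dict, PySem.Raise.InRange matrix_from_to.length p.2 ∧
    PySem.Raise.InRange (pvMinLen matrix_from_to) p.2
instance (friends_dict : List (String × Int)) (matrix_from_to : List (List Int)) : Decidable (Pre_make_dict_map_gave_took_met friends_dict matrix_from_to) := by unfold Pre_make_dict_map_gave_took_met; infer_instance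

def pvWitness_make_dict_map_gave_took_met : (List (String × Int)) × List (List Int) :=
  ([("a", 0), ("b", 1)], [[1, 2], [3, 4]])

def Spec_make_dict_map_gave_took_met (friends_dict : List (String × Int)) (matrix_from_to : List (List Int)) (out : List (String × List Int)) : Prop := out = make_dict_map_gave_took_met_alt friends_dict matrix_from_to
instance (friends_dict : List (String × Int)) (matrix_from_to : List (List Int)) (out : List (String × List Int)) : Decidable (Spec_make_dict_map_gave_took_met friends_dict matrix_from_to out) := by unfold Spec_make_dict_map_gave_took_met; infer_instance

-- ===== CLAIM (what is proved, stated in full; the proofs are below) =====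
def Claim_equal_make_dict_map_gave_took_met : Prop := ∀ (friends_dict : List (String × Int)) (matrix_from_to : List (List Int)), Dom_make_dict_map_gave_took_met friends_dict matrix_from_to → Pre_make_dict_map_gave_took_met friends_dict matrix_from_to → Spec_make_dict_map_gave_took_met friends_dict matrix_from_to (make_dict_map_gave_took_met friends_dict matrix_from_to)

-- ===== LEMMAS AND PROOFS =====

-- dedup is the identity on a Nodup list
lemma pv_foldl_add_of_nodup (l : List String) (acc : List String) (h : l.Nodup)
    (hd : ∀ x ∈ l, x ∉ acc) : l.foldl PySem.Set.add acc = acc ++ l := by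
  induction l generalizing acc with
  | nil => simp
  | cons x xs ih =>
    simp only [List.foldl_cons, PySem.Set.add, PySem.Set.contains]
    rw [if_neg (by simp only [List.contains_eq_mem, decide_eq_true_eq]; exact hd x (by simp))]
    rw [ih (acc ++ [x]) h.of_cons]
    · simp
    · intro y hy
      simp only [List.mem_append, List.mem_singleton, not_or]
      refine ⟨hd y (by simp [hy]), ?_⟩
      intro he; subst he; exact (List.nodup_cons.mp h).1 hy

lemma pv_dedup_of_nodup (l : List String) (h : l.Nodup) : PySem.List.dedup l = l := by
  simpa using pv_foldl_add_of_nodup l [] h (by simp)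

-- pyGet? commutes with map
lemma pv_pyGet?_map {α β : Type} (f : α → β) (xs : List α) (i : Int) :
    PySem.List.pyGet? (xs.map f) i = (PySem.List.pyGet? xs i).map f := by
  simp only [PySem.List.pyGet?, List.length_map]
  cases PySem.List.pyIdx? xs.length i with
  | none => rfl
  | some k => simp

-- pvMinLen facts
lemma pv_foldl_min_map_tail (rs : List (List Int)) (a : Nat) :
    (rs.map List.tail).foldl (fun x r => min x r.length) (a - 1)
      = rs.foldl (fun x r => min x r.length) a - 1 := by
  induction rs generalizing a with
  | nil => simp
  | cons r rs ih =>
    simp only [List.map_cons, List.foldl_cons, List.length_tail]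
    rw [show min (a - 1) (r.length - 1) = min a r.length - 1 by omega]
    exact ih _

lemma pv_minLen_map_tail (r : List Int) (rs : List (List Int)) :
    pvMinLen ((r :: rs).map List.tail) = pvMinLen (r :: rs) - 1 := by
  simp only [pvMinLen, List.map_cons, List.length_tail]
  exact pv_foldl_min_map_tail rs r.length

lemma pv_foldl_min_le (rs : List (List Int)) (a : Nat) :
    rs.foldl (fun x r => min x r.length) a ≤ a := by
  induction rs generalizing a with
  | nil => simp
  | cons r rs ih =>
    simp only [List.foldl_cons]
    exact le_trans (ih (min a r.length)) (by omega)

lemma pv_foldl_min_le_mem (rs : List (List Int)) (a : Nat) (r : List Int) (h : r ∈ rs) :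
    rs.foldl (fun x r => min x r.length) a ≤ r.length := by
  induction rs generalizing a with
  | nil => simp at h
  | cons y ys ih =>
    simp only [List.foldl_cons]
    rcases List.mem_cons.mp h with h | h
    · subst h
      exact le_trans (pv_foldl_min_le ys _) (by omega)
    · exact ih _ h

lemma pv_minLen_le (mat : List (List Int)) (r : List Int) (h : r ∈ mat) :
    pvMinLen mat ≤ r.length := by
  cases mat with
  | nil => simp at h
  | cons x xs =>
    simp only [pvMinLen]
    rcases List.mem_cons.mp h with h | h
    · subst h; exact pv_foldl_min_le _ _
    · exact pv_foldl_min_le_mem _ _ _ h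

lemma pv_foldl_min_pos (rs : List (List Int)) (a : Nat) (ha : 0 < a)
    (h : ∀ r ∈ rs, 0 < r.length) : 0 < rs.foldl (fun x r => min x r.length) a := by
  induction rs generalizing a with
  | nil => simpa
  | cons r rs ih =>
    simp only [List.foldl_cons]
    exact ih _ (by have := h r (by simp); omega) (fun r hr => h r (by simp [hr]))

-- pyZipStar is the transpose truncated to the shortest row
lemma pv_pyZipStar_eq (mat : List (List Int)) :
    pyZipStar mat = (List.range (pvMinLen mat)).map (fun j => mat.map (fun r => r.getD j 0)) := by
  generalize hn : pvMinLen mat = n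
  induction n generalizing mat with
  | zero =>
    rw [pyZipStar]
    simp only [List.range_zero, List.map_nil]
    by_cases hm : mat.isEmpty || mat.any List.isEmpty
    · simp [hm]
    · exfalso
      simp only [Bool.or_eq_true, List.isEmpty_iff, List.any_eq_true, not_or, not_exists,
        not_and] at hm
      obtain ⟨hne, hrows⟩ := hm
      cases mat with
      | nil => exact hne rfl
      | cons r rs =>
        have hpos : 0 < pvMinLen (r :: rs) := by
          simp only [pvMinLen]
          apply pv_foldl_min_pos
          · have hne' : r ≠ [] := hrows r (by simp)
            cases r with | nil => simp at hne' | cons _ _ => simp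
          · intro q hq
            have hne' : q ≠ [] := hrows q (by simp [hq])
            cases q with | nil => simp at hne' | cons _ _ => simp
        omega
  | succ n ih =>
    have hne : mat ≠ [] := by
      intro h; subst h; simp [pvMinLen] at hn
    have hrows : ∀ r ∈ mat, r ≠ [] := by
      intro r hr he
      have := pv_minLen_le mat r hr
      rw [he, hn] at this
      simp at this
    rw [pyZipStar]
    rw [if_neg (by
      simp only [Bool.or_eq_true, List.isEmpty_iff, List.any_eq_true, not_or, not_exists,
        not_and]
      exact ⟨hne, fun r hr => hrows r hr⟩)]
    have htail : pvMinLen (mat.map List.tail) = n := by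
      cases mat with
      | nil => exact absurd rfl hne
      | cons r rs => rw [pv_minLen_map_tail, hn]; omega
    rw [ih _ htail, List.range_succ_eq_map]
    simp only [List.map_cons, List.map_map]
    refine congrArg₂ _ ?_ ?_
    · apply List.map_congr_left
      intro r _
      cases r <;> simp
    · apply List.map_congr_left
      intro j _
      simp only [Function.comp]
      apply List.map_congr_left
      intro r hr
      have := hrows r hr
      cases r with
      | nil => exact absurd rfl this
      | cons a as => simp

-- the dict lookup A performs returns the pair's own value under Nodup keys
lemma pv_get?_mk (fd : List (String × Int)) (p : String × Int)
    (hnd : (fd.map Prod.fst).Nodup) (hp : p ∈ fd) :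
    (PySem.Dict.mk fd).get? p.1 = some p.2 := by
  apply PySem.Dict.get?_of_mem_items (d := PySem.Dict.mk fd) (k := p.1) (v := p.2)
  · exact hp
  · simpa [PySem.Dict.keys] using hnd

-- ===== VERDICT (by name: the statement is the Claim_ definition above) =====
theorem make_dict_map_gave_took_met_spec : Claim_equal_make_dict_map_gave_took_met := by
  intro fd mat _ hpre
  obtain ⟨hnd, hin⟩ := hpre
  unfold Spec_make_dict_map_gave_took_met
  unfold make_dict_map_gave_took_met make_dict_map_gave_took_met_alt
  rw [pv_dedup_of_nodup _ hnd, List.foldl_map]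
  apply congrArg PySem.Dict.items
  apply PySem.List.foldl_congr_mem
  intro acc p hp
  have hi := hin p hp
  rw [pv_get?_mk fd p hnd hp]
  simp only [Option.getD_some]
  have hgave : pvSumIRow mat p.2 = (PySem.List.pyGet? (mat.map List.sum) p.2).getD 0 := by
    rw [pv_pyGet?_map]
    unfold pvSumIRow
    cases hg : PySem.List.pyGet? mat p.2 with
    | none =>
      exfalso
      exact (PySem.List.pyGet?_eq_none_iff mat p.2).mp hg hi.1
    | some r => simp
  have htook : pvSumICol mat p.2
      = (PySem.List.pyGet? ((List.range (pvMinLen mat)).map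
          (fun j => (mat.map (fun row => row.getD j 0)).sum)) p.2).getD 0 := by
    unfold pvSumICol
    rw [pv_pyZipStar_eq, List.map_map]
    rfl
  rw [hgave, htook]
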